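-- pv_equiv track=rewrite | github.com/devng/code-puzzles | src/devng/adventofcode/day14/day14.py | all_distances
-- ===== SOURCE A (Python) =====
-- def race_distance(duration, speed, t_speed, t_rest):
--     t = t_speed + t_rest
--     d = (duration // t) * speed * t_speed
--     r = min(duration % t, t_speed)
--     d += r * speed
--
--     return d
--
-- def all_distances(duration, reindeer_dict):
--     result = []
--     for k, v in reindeer_dict.items():
--         d = race_distance(duration, v[0], v[1], v[2])
--         result.append((k, d))
--     result.sort(key=lambda tup: tup[1])
--     result.reverse()
--     return result
-- ===== SOURCE B (Python) =====
-- def all_distances(duration, reindeer_dict):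
--     result = []
--     for k, (speed, t_fly, t_rest) in reindeer_dict.items():
--         cycle = t_fly + t_rest
--         rem = duration
--         full = 0
--         while rem >= cycle:
--             step, count = cycle, 1
--             while step * 2 <= rem:
--                 step *= 2
--                 count *= 2
--             rem -= step
--             full += count
--         d = speed * (t_fly * full + min(rem, t_fly))
--         result.append((k, d))
--     result.sort(key=lambda tup: tup[1])
--     result.reverse()
--     return result
-- ===== Notes on version B (the rewrite author's own statement) =====
-- stated objective: alternative
-- what changed: race_distance's closed-form floor-division/modulo arithmetic is replaced by a binary doubling-subtraction loop: repeatedly subtract the largest power-of-two multiple of the fly+rest cycle that fits in the remaining time (counting whole cycles), then settle the final partial cycle with min(rem, t_fly) — no // or % at all.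
-- outside the precondition, e.g. on all_distances(-3, {'a': (2, 1, 1)}): A returns [('a', -2)], B returns [('a', -6)]; on all_distances(5, {'a': (1, 1, -3)}): A returns [('a', -4)], B does not finish within the time limit
import Mathlib
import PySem

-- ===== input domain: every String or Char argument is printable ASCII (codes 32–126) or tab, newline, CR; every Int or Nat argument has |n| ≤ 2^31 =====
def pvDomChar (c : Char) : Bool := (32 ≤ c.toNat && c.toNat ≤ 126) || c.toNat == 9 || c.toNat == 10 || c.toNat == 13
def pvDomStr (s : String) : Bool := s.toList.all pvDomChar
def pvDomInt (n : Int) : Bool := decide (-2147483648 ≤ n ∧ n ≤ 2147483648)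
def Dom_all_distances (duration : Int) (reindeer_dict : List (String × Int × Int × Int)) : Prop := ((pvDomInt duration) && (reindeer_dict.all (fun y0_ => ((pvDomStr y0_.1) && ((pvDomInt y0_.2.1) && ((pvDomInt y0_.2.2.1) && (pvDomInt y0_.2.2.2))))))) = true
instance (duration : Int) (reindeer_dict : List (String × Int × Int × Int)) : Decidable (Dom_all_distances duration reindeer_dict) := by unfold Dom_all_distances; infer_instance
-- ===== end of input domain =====

-- B replaces the closed-form //-and-% race arithmetic by a binary doubling-subtraction loop (no division; alternative algorithm, not faster).

-- ===== PORT A =====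
-- literal port of race_distance (closed form with Python floor division / modulo)
def race_distance (duration speed t_speed t_rest : Int) : Int :=
  let t := t_speed + t_rest
  let d := PySem.Int.floordiv duration t * speed * t_speed
  let r := min (PySem.Int.mod duration t) t_speed
  d + r * speed

def all_distances (duration : Int) (reindeer_dict : List (String × Int × Int × Int)) : List (String × Int) :=
  let result := reindeer_dict.foldl
    (fun acc kv => acc ++ [(kv.1, race_distance duration kv.2.1 kv.2.2.1 kv.2.2.2)]) []
  (PySem.List.sorted result (fun tup => tup.2) false).reverse

-- ===== PORT B =====
-- the inner while loop of Source B: double step and count while another doubling still fits in rem;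
-- fuel only makes the loop total (it bounds the iterations, which double step each time)
def innerLoopB : Nat → Int → Int → Int → Int × Int
  | 0, step, count, _rem => (step, count)
  | Nat.succ f, step, count, rem =>
      if step * 2 ≤ rem then innerLoopB f (step * 2) (count * 2) rem else (step, count)

-- the outer while loop of Source B: subtract the largest doubled chunk of whole cycles that fits
def outerLoopB : Nat → Int → Int → Int → Int × Int
  | 0, _cycle, rem, full => (rem, full)
  | Nat.succ f, cycle, rem, full =>
      if cycle ≤ rem then
        let p := innerLoopB (rem.toNat + 1) cycle 1 rem
        outerLoopB f cycle (rem - p.1) (full + p.2)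
      else (rem, full)

def all_distances_alt (duration : Int) (reindeer_dict : List (String × Int × Int × Int)) : List (String × Int) :=
  let result := reindeer_dict.foldl
    (fun acc kv =>
      let speed := kv.2.1
      let t_fly := kv.2.2.1
      let cycle := t_fly + kv.2.2.2
      let p := outerLoopB (duration.toNat + 1) cycle duration 0
      acc ++ [(kv.1, speed * (t_fly * p.2 + min p.1 t_fly))]) []
  (PySem.List.sorted result (fun tup => tup.2) false).reverse

-- ===== PRECONDITION & SPEC =====
-- Pre_ excludes negative durations and reindeer whose fly+rest cycle is not positive: with cycle = 0 A raises
-- ZeroDivisionError, and on negative durations or negative cycles (outside the puzzle's domain) B's simulation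
-- loop diverges or returns a different value than A's floor-division formula.
def Pre_all_distances (duration : Int) (reindeer_dict : List (String × Int × Int × Int)) : Prop :=
  0 ≤ duration ∧ ∀ p ∈ reindeer_dict, 0 < p.2.2.1 + p.2.2.2
instance (duration : Int) (reindeer_dict : List (String × Int × Int × Int)) : Decidable (Pre_all_distances duration reindeer_dict) := by unfold Pre_all_distances; infer_instance

def pvWitness_all_distances : Int × (List (String × Int × Int × Int)) :=
  (10, [("comet", 14, 10, 127), ("dancer", 16, 11, 162)])

def Spec_all_distances (duration : Int) (reindeer_dict : List (String × Int × Int × Int)) (out : List (String × Int)) : Prop := out = all_distances_alt duration reindeer_dict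
instance (duration : Int) (reindeer_dict : List (String × Int × Int × Int)) (out : List (String × Int)) : Decidable (Spec_all_distances duration reindeer_dict out) := by unfold Spec_all_distances; infer_instance

-- ===== CLAIM (what is proved, stated in full; the proofs are below) =====
def Claim_equal_all_distances : Prop := ∀ (duration : Int) (reindeer_dict : List (String × Int × Int × Int)), Dom_all_distances duration reindeer_dict → Pre_all_distances duration reindeer_dict → Spec_all_distances duration reindeer_dict (all_distances duration reindeer_dict)

-- ===== LEMMAS AND PROOFS =====

-- the inner loop returns the largest doubled chunk: a multiple of cycle, at least step, fitting in rem,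
-- whose doubling does not fit
theorem innerLoopB_spec (cycle : Int) :
    ∀ (fuel : Nat) (step count rem : Int), 0 < step → step ≤ rem → (rem - step).toNat < fuel →
      step = count * cycle →
      (innerLoopB fuel step count rem).1 = (innerLoopB fuel step count rem).2 * cycle ∧
      step ≤ (innerLoopB fuel step count rem).1 ∧
      (innerLoopB fuel step count rem).1 ≤ rem ∧
      rem < 2 * (innerLoopB fuel step count rem).1 := by
  intro fuel
  induction fuel with
  | zero => intro step count rem h0 hle hfuel _; omega
  | succ f ih =>
      intro step count rem h0 hle hfuel hmul
      rw [innerLoopB]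
      by_cases h : step * 2 ≤ rem
      · rw [if_pos h]
        have := ih (step * 2) (count * 2) rem (by omega) (by omega) (by omega) (by rw [hmul]; ring)
        exact ⟨this.1, by omega, this.2.2⟩
      · rw [if_neg h]
        exact ⟨hmul, le_refl _, hle, by omega⟩

-- the outer loop's invariant: with positive cycle, nonnegative rem and enough fuel, it lands on rem % cycle
-- having accumulated rem / cycle whole cycles
theorem outerLoopB_spec (cycle : Int) (hc : 0 < cycle) :
    ∀ (fuel : Nat) (rem full : Int), 0 ≤ rem → rem < (fuel : Int) →
      outerLoopB fuel cycle rem full = (rem % cycle, full + rem / cycle) := by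
  intro fuel
  induction fuel with
  | zero => intro rem full h0 hlt; omega
  | succ f ih =>
      intro rem full h0 hlt
      rw [outerLoopB]
      by_cases h : cycle ≤ rem
      · rw [if_pos h]
        have hp := innerLoopB_spec cycle (rem.toNat + 1) cycle 1 rem hc h (by omega) (by ring)
        set p := innerLoopB (rem.toNat + 1) cycle 1 rem with hpdef
        obtain ⟨hmul, hstep, hple, hdbl⟩ := hp
        have hrec := ih (rem - p.1) (full + p.2) (by omega) (by push_cast at hlt ⊢; omega)
        rw [hrec]
        have hm : rem - p.1 = rem + (-p.2) * cycle := by rw [hmul]; ring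
        have h1 : (rem - p.1) % cycle = rem % cycle := by rw [hm, Int.add_mul_emod_self_right]
        have h2 : (rem - p.1) / cycle = rem / cycle + (-p.2) := by
          rw [hm, Int.add_mul_ediv_right _ _ (by omega : cycle ≠ 0)]
        rw [h1, h2, Prod.mk.injEq]
        exact ⟨rfl, by ring⟩
      · rw [if_neg h]
        have h1 : rem % cycle = rem := Int.emod_eq_of_lt h0 (by omega)
        have h2 : rem / cycle = 0 := Int.ediv_eq_zero_of_lt h0 (by omega)
        rw [h1, h2, Prod.mk.injEq]
        exact ⟨rfl, by ring⟩

-- per reindeer: B's binary-subtraction distance equals A's closed form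
theorem elem_eq (duration speed t_fly t_rest : Int)
    (hd : 0 ≤ duration) (hc : 0 < t_fly + t_rest) :
    (let p := outerLoopB (duration.toNat + 1) (t_fly + t_rest) duration 0
     speed * (t_fly * p.2 + min p.1 t_fly)) = race_distance duration speed t_fly t_rest := by
  rw [outerLoopB_spec (t_fly + t_rest) hc (duration.toNat + 1) duration 0 hd (by omega)]
  simp only [race_distance]
  rw [PySem.Int.mod_eq_emod_of_pos hc, PySem.Int.floordiv_eq_ediv_of_pos hc]
  have : (0 : Int) + duration / (t_fly + t_rest) = duration / (t_fly + t_rest) := by ring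
  rw [this]
  rw [mul_add, mul_comm (min (duration % (t_fly + t_rest)) t_fly) speed]
  ring_nf

-- ===== VERDICT (by name: the statement is the Claim_ definition above) =====
theorem all_distances_spec : Claim_equal_all_distances := by
  intro duration rd _hdom hpre
  obtain ⟨hd, hall⟩ := hpre
  show all_distances duration rd = all_distances_alt duration rd
  simp only [all_distances, all_distances_alt]
  congr 2
  rw [PySem.List.foldl_append_singleton_eq_map, PySem.List.foldl_append_singleton_eq_map]
  apply List.map_congr_left
  intro kv hmem
  have := elem_eq duration kv.2.1 kv.2.2.1 kv.2.2.2 hd (hall kv hmem)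
  simp only at this
  rw [← this]
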